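-- pv_equiv track=rewrite | github.com/Animesh459/dsa-journey | codeforces/the-fibonacci-segment.py | longest_fib_segment
-- ===== SOURCE A (Python) =====
-- def longest_fib_segment(n, a):
--     if n <= 2:
--         return n  # Any segment of length 1 or 2 is always good
--
--     max_len = 2
--     current_len = 2
--
--     for i in range(2, n):
--         if a[i] == a[i - 1] + a[i - 2]:
--             current_len += 1
--         else:
--             current_len = 2  # reset because this breaks the Fibonacci property
--         max_len = max(max_len, current_len)
--
--     return max_len
-- ===== SOURCE B (Python) =====
-- def _runs(xs):
--     """Run-length encode xs into (value, run_length) pairs."""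
--     res = []
--     while xs:
--         h = xs[0]
--         k = 1
--         while k < len(xs) and xs[k] == h:
--             k += 1
--         res.append((h, k))
--         xs = xs[k:]
--     return res
--
--
-- def longest_fib_segment(n, a):
--     if n <= 2:
--         return n
--     ok = [a[i] == a[i - 1] + a[i - 2] for i in range(2, n)]
--     best = 0
--     for b, k in _runs(ok):
--         if b:
--             best = max(best, k)
--     return 2 + best
-- ===== Notes on version B (the rewrite author's own statement) =====
-- stated objective: alternative
-- what changed: Replaces A's single fused max/counter loop by a two-phase decomposition: build the boolean table ok[i] = (a[i] == a[i-1] + a[i-2]), run-length encode it into (value, length) groups, and return 2 plus the longest True group (0 if none).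
import Mathlib
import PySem

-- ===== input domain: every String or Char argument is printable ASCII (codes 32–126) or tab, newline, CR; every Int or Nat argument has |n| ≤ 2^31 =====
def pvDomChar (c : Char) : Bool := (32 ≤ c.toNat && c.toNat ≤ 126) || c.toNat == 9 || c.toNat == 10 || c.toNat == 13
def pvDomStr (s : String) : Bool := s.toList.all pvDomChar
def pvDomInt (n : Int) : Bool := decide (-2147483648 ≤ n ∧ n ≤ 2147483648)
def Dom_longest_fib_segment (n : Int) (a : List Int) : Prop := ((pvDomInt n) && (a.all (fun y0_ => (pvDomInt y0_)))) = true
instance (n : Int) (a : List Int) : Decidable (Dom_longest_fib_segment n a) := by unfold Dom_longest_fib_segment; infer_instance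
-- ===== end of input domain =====

-- B re-decomposes A's fused max/counter loop into building a boolean table, run-length
-- encoding it, and taking the longest True run; objective: alternative (same cost).

-- ===== PORT A =====
def longest_fib_segment (n : Int) (a : List Int) : Int :=
  if n ≤ 2 then n
  else
    let r := (PySem.List.pyRange 2 n 1).foldl
      (fun (st : Int × Int) i =>
        let cur :=
          if PySem.List.pyGetD a i 0 = PySem.List.pyGetD a (i - 1) 0 + PySem.List.pyGetD a (i - 2) 0
          then st.2 + 1 else 2
        (max st.1 cur, cur))
      (2, 2)
    r.1

-- ===== PORT B =====
-- run-length encoding pass of Source B's _runs (inner while = count of leading equal elements)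
def pvRunsB : List Bool → List (Bool × Int)
  | [] => []
  | h :: t =>
      (h, 1 + ((t.takeWhile (· == h)).length : Int)) :: pvRunsB (t.dropWhile (· == h))
  termination_by xs => xs.length
  decreasing_by
    simp only [List.length_cons]
    exact Nat.lt_succ_of_le (List.length_dropWhile_le _ _)

def longest_fib_segment_alt (n : Int) (a : List Int) : Int :=
  if n ≤ 2 then n
  else
    let ok := (PySem.List.pyRange 2 n 1).map
      (fun i => decide (PySem.List.pyGetD a i 0 = PySem.List.pyGetD a (i - 1) 0 + PySem.List.pyGetD a (i - 2) 0))
    let best := (pvRunsB ok).foldl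
      (fun best p => if p.1 then max best p.2 else best) 0
    2 + best

-- ===== PRECONDITION & SPEC =====
-- Pre_ excludes exactly the inputs where Python A raises IndexError: n > 2 with n > len(a).
def Pre_longest_fib_segment (n : Int) (a : List Int) : Prop := n ≤ 2 ∨ n ≤ (a.length : Int)
instance (n : Int) (a : List Int) : Decidable (Pre_longest_fib_segment n a) := by
  unfold Pre_longest_fib_segment; infer_instance

def pvWitness_longest_fib_segment : Int × List Int := (5, [1, 1, 2, 3, 5])

def Spec_longest_fib_segment (n : Int) (a : List Int) (out : Int) : Prop := out = longest_fib_segment_alt n a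
instance (n : Int) (a : List Int) (out : Int) : Decidable (Spec_longest_fib_segment n a out) := by
  unfold Spec_longest_fib_segment; infer_instance

-- ===== CLAIM (what is proved, stated in full; the proofs are below) =====
def Claim_equal_longest_fib_segment : Prop := ∀ (n : Int) (a : List Int), Dom_longest_fib_segment n a → Pre_longest_fib_segment n a → Spec_longest_fib_segment n a (longest_fib_segment n a)

-- ===== LEMMAS AND PROOFS =====

-- length of the leading True prefix
def pvLead (xs : List Bool) : Int := ((xs.takeWhile (· == true)).length : Int)

-- B's second pass, as a function of the boolean table
def pvBest (xs : List Bool) : Int :=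
  (pvRunsB xs).foldl (fun best p => if p.1 then max best p.2 else best) 0

-- A's loop body, beta-reduced
def pvStep (st : Int × Int) (b : Bool) : Int × Int :=
  (max st.1 (if b then st.2 + 1 else 2), if b then st.2 + 1 else 2)

theorem pvLead_nonneg (xs : List Bool) : 0 ≤ pvLead xs := by
  simp [pvLead]

theorem pvLead_false (t : List Bool) : pvLead (false :: t) = 0 := by
  simp [pvLead, List.takeWhile]

theorem pvLead_true (t : List Bool) : pvLead (true :: t) = 1 + pvLead t := by
  simp only [pvLead, List.takeWhile, BEq.rfl, List.length_cons]
  push_cast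
  omega

theorem pvBest_fold_ge (rs : List (Bool × Int)) (i : Int) :
    i ≤ rs.foldl (fun best p => if p.1 then max best p.2 else best) i := by
  induction rs generalizing i with
  | nil => simp
  | cons p rs ih =>
      simp only [List.foldl_cons]
      refine le_trans ?_ (ih _)
      split <;> simp

theorem pvBest_fold_init (rs : List (Bool × Int)) (i : Int) (hi : 0 ≤ i) :
    rs.foldl (fun best p => if p.1 then max best p.2 else best) i
      = max i (rs.foldl (fun best p => if p.1 then max best p.2 else best) 0) := by
  induction rs generalizing i with
  | nil => simpa using hi
  | cons p rs ih =>
      simp only [List.foldl_cons]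
      have h1 : (0:Int) ≤ if p.1 then max i p.2 else i := by split <;> omega
      have h0 : (0:Int) ≤ if p.1 then max 0 p.2 else 0 := by split <;> simp
      have hL := ih (if p.1 then max i p.2 else i) h1
      have hR := ih (if p.1 then max 0 p.2 else 0) h0
      rw [hL, hR]
      have hX := pvBest_fold_ge rs 0
      split_ifs <;> omega

theorem pvBest_nonneg (xs : List Bool) : 0 ≤ pvBest xs := by
  simpa [pvBest] using pvBest_fold_ge (pvRunsB xs) 0

theorem pvBest_cons (h : Bool) (t : List Bool) :
    pvBest (h :: t)
      = if h then max (1 + ((t.takeWhile (· == h)).length : Int))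
                     (pvBest (t.dropWhile (· == h)))
        else pvBest (t.dropWhile (· == h)) := by
  unfold pvBest
  rw [pvRunsB]
  simp only [List.foldl_cons]
  cases h with
  | false => simp
  | true =>
      simp only [if_true]
      rw [pvBest_fold_init _ _ (le_max_left 0 _)]
      have hL : (0:Int) ≤ ((t.takeWhile (· == true)).length : Int) := by positivity
      simp only [max_def]
      split_ifs <;> omega

theorem pvBest_false (t : List Bool) : pvBest (false :: t) = pvBest t := by
  rw [pvBest_cons]
  simp only [Bool.false_eq_true, if_false]
  cases t with
  | nil => rfl
  | cons b t' =>
      cases b with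
      | false =>
          rw [show List.dropWhile (· == false) (false :: t') = List.dropWhile (· == false) t' by
                simp [List.dropWhile]]
          rw [pvBest_cons]
          simp
      | true => simp [List.dropWhile]

theorem pvBest_true (t : List Bool) :
    pvBest (true :: t) = max (1 + pvLead t) (pvBest t) := by
  rw [pvBest_cons]
  simp only [if_true]
  cases t with
  | nil => simp [pvLead, List.takeWhile]
  | cons b t' =>
      cases b with
      | false => simp [List.dropWhile, List.takeWhile, pvLead]
      | true =>
          rw [pvLead_true, pvBest_cons]
          simp only [if_true, pvLead]
          rw [show List.takeWhile (· == true) (true :: t') = true :: List.takeWhile (· == true) t' by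
                simp [List.takeWhile]]
          rw [show List.dropWhile (· == true) (true :: t') = List.dropWhile (· == true) t' by
                simp [List.dropWhile]]
          simp only [List.length_cons]
          have hL : (0:Int) ≤ ((t'.takeWhile (· == true)).length : Int) := by positivity
          push_cast
          simp only [max_def]
          split_ifs <;> omega

theorem pvBest_ge_lead (xs : List Bool) : pvLead xs ≤ pvBest xs := by
  cases xs with
  | nil => simp [pvLead, pvBest, pvRunsB]
  | cons b t =>
      cases b with
      | false =>
          rw [pvLead_false, pvBest_false]
          exact pvBest_nonneg t
      | true =>
          rw [pvLead_true, pvBest_true]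
          have h1 := pvLead_nonneg t
          simp only [max_def]
          split_ifs <;> omega

-- A's fused loop, over an arbitrary boolean table, characterised by pvLead/pvBest
theorem pvAfold_char (xs : List Bool) (m c : Int) (hc : 2 ≤ c) (hm : c ≤ m) :
    (xs.foldl pvStep (m, c)).1 = max m (max (c + pvLead xs) (2 + pvBest xs)) := by
  induction xs generalizing m c with
  | nil =>
      simp only [List.foldl_nil, pvLead, pvBest, pvRunsB, List.takeWhile, List.length_nil,
        List.foldl_nil, Int.natCast_zero]
      simp only [max_def]
      split_ifs <;> omega
  | cons b t ih =>
      rw [List.foldl_cons]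
      cases b with
      | true =>
          rw [show pvStep (m, c) true = (max m (c + 1), c + 1) by simp [pvStep]]
          rw [ih (max m (c + 1)) (c + 1) (by omega) (by omega)]
          rw [pvBest_true, pvLead_true]
          have h1 := pvLead_nonneg t
          have h2 := pvBest_nonneg t
          simp only [max_def]
          split_ifs <;> omega
      | false =>
          rw [show pvStep (m, c) false = (max m 2, 2) by simp [pvStep]]
          rw [max_eq_left (by omega : (2:Int) ≤ m), ih m 2 (by omega) (by omega)]
          rw [pvBest_false, pvLead_false]
          have h1 := pvLead_nonneg t
          have h3 := pvBest_ge_lead t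
          simp only [max_def]
          split_ifs <;> omega

-- ===== VERDICT (by name: the statement is the Claim_ definition above) =====
theorem longest_fib_segment_spec : Claim_equal_longest_fib_segment := by
  intro n a _ _
  unfold Spec_longest_fib_segment longest_fib_segment longest_fib_segment_alt
  by_cases hn : n ≤ 2
  · simp [hn]
  · simp only [hn, if_false]
    have hfun :
        (fun (st : Int × Int) i =>
          let cur :=
            if PySem.List.pyGetD a i 0 = PySem.List.pyGetD a (i - 1) 0 + PySem.List.pyGetD a (i - 2) 0
            then st.2 + 1 else 2
          (max st.1 cur, cur))
        = (fun (st : Int × Int) i =>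
            pvStep st (decide (PySem.List.pyGetD a i 0
              = PySem.List.pyGetD a (i - 1) 0 + PySem.List.pyGetD a (i - 2) 0))) := by
      funext st i
      simp [pvStep]
    rw [hfun, ← List.foldl_map]
    rw [pvAfold_char _ 2 2 le_rfl le_rfl]
    set ok := (PySem.List.pyRange 2 n 1).map
      (fun i => decide (PySem.List.pyGetD a i 0
        = PySem.List.pyGetD a (i - 1) 0 + PySem.List.pyGetD a (i - 2) 0)) with hok
    have h1 := pvLead_nonneg ok
    have h2 := pvBest_ge_lead ok
    show max 2 (max (2 + pvLead ok) (2 + pvBest ok)) = 2 + pvBest ok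
    simp only [max_def]
    split_ifs <;> omega
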